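-- pv_equiv track=rewrite | github.com/i12lanob/codigosCriptografia | rsa.py | preparetextdecipher
-- ===== SOURCE A (Python) =====
-- def preparetextdecipher(vec_num):
--     #cadena = ''.join(vec_num)  # Unir los valores en una única cadena
--     cadena = ''.join(str(num) for num in vec_num)
--     resultado = []
--     i = 0
--
--     while i < len(cadena):  # Recorrer la cadena completa
--         if i + 2 <= len(cadena) and cadena[i] == '3' and cadena[i+1]=='0':  # Verificar si el par actual es '30'
--             # Verificar si el '30' es al final y se repite
--             if cadena[i:] == '30' * ((len(cadena) - i) // 2):
--                 break  # Ignorar todos los '30' consecutivos al final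
--
--         if i == len(cadena) - 1 and len(cadena) % 2 != 0: # Si estamos ya al final y la cadena es impar la saltamos (porque al ser impar está rellena de un 0)
--             if cadena[i] == '0':
--                 break
--
--         # Agregar el carácter si no es relleno
--         resultado.append(cadena[i])
--         i += 1
--
--     return ''.join(resultado)  # Devolver la cadena sin rellenos
-- ===== SOURCE B (Python) =====
-- def preparetextdecipher(vec_num):
--     # Count trailing '30' pairs from the end in one linear pass, then slice once.
--     s = ''.join(str(num) for num in vec_num)
--     n = len(s)
--     k = 0
--     while 2 * k + 2 <= n and s[n - 2 * k - 2:n - 2 * k] == '30':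
--         k += 1
--     if k:
--         return s[:n - 2 * k]
--     if n % 2 == 1 and s[-1] == '0':
--         return s[:-1]
--     return s
-- ===== Notes on version B (the rewrite author's own statement) =====
-- stated objective: faster
-- what changed: Instead of scanning forward and re-comparing the whole remaining suffix against '30'*k at each index (quadratic), B counts the maximal run of trailing '30' pairs in one backward pass and returns a single slice (plus the odd-trailing-'0' rule).
import Mathlib
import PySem

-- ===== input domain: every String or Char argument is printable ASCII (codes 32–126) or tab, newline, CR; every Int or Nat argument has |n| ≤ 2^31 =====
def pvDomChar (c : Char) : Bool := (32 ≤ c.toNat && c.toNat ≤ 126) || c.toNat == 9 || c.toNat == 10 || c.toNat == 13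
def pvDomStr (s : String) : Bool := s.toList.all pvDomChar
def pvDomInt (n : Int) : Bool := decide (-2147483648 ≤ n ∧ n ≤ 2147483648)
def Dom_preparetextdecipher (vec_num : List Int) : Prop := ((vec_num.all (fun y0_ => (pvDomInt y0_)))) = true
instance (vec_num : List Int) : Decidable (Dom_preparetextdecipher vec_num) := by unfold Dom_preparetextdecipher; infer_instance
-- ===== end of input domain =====

-- B strips the maximal trailing run of '30' pairs with one backward count and a single slice
-- (A re-compares the whole remaining suffix at every index); return values agree everywhere.

-- ===== PORT A =====
-- '30' * k
def pvRepA (k : Nat) : List Char :=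
  match k with
  | 0 => []
  | k + 1 => '3' :: '0' :: pvRepA k

-- the while loop of A: i is the index, res the accumulator `resultado`
def pvLoopA (c : List Char) (i : Nat) (res : List Char) : List Char :=
  if i < c.length then
    if (i + 2 ≤ c.length ∧ c.getD i ' ' = '3' ∧ c.getD (i+1) ' ' = '0')
        ∧ c.drop i = pvRepA ((c.length - i) / 2) then
      res
    else if i = c.length - 1 ∧ c.length % 2 ≠ 0 ∧ c.getD i ' ' = '0' then
      res
    else
      pvLoopA c (i + 1) (res ++ [c.getD i ' '])
  else res
termination_by c.length - i

def preparetextdecipher (vec_num : List Int) : String :=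
  let cadena := (vec_num.map (fun num => (PySem.Int.toStr num).toList)).flatten
  String.mk (pvLoopA cadena 0 [])

-- ===== PORT B =====
-- the backward-count while loop of B: counts leading '0','3' pairs of the reversed string
def pvCount03 (l : List Char) : Nat :=
  match l with
  | '0' :: '3' :: rest => pvCount03 rest + 1
  | _ => 0

def preparetextdecipher_alt (vec_num : List Int) : String :=
  let s := (vec_num.map (fun num => (PySem.Int.toStr num).toList)).flatten
  let k := pvCount03 s.reverse
  if k ≠ 0 then String.mk (s.take (s.length - 2 * k))
  else if s.length % 2 = 1 ∧ s.getD (s.length - 1) ' ' = '0' then String.mk s.dropLast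
  else String.mk s

-- ===== PRECONDITION & SPEC =====
def Spec_preparetextdecipher (vec_num : List Int) (out : String) : Prop := out = preparetextdecipher_alt vec_num
instance (vec_num : List Int) (out : String) : Decidable (Spec_preparetextdecipher vec_num out) := by unfold Spec_preparetextdecipher; infer_instance

-- ===== CLAIM (what is proved, stated in full; the proofs are below) =====
def Claim_equal_preparetextdecipher : Prop := ∀ (vec_num : List Int), Dom_preparetextdecipher vec_num → Spec_preparetextdecipher vec_num (preparetextdecipher vec_num)

-- ===== LEMMAS AND PROOFS =====

-- '03' * k (the reverse of pvRepA k)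
def pvRep03 (k : Nat) : List Char :=
  match k with
  | 0 => []
  | k + 1 => '0' :: '3' :: pvRep03 k

theorem pvRepA_length (k : Nat) : (pvRepA k).length = 2 * k := by
  induction k with
  | zero => rfl
  | succ k ih => simp [pvRepA, ih]; omega

theorem pvRep03_snoc (k : Nat) : pvRep03 k ++ ['0', '3'] = pvRep03 (k + 1) := by
  induction k with
  | zero => rfl
  | succ k ih => simp [pvRep03] at ih ⊢; exact ih

theorem pvRepA_reverse (k : Nat) : (pvRepA k).reverse = pvRep03 k := by
  induction k with
  | zero => rfl
  | succ k ih => simp [pvRepA, ih, pvRep03_snoc]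

theorem pvCount03_rep (k : Nat) (t : List Char) : pvCount03 (pvRep03 k ++ t) = k + pvCount03 t := by
  induction k with
  | zero => simp [pvRep03]
  | succ k ih => simp [pvRep03, pvCount03, ih]; omega

theorem pvCount03_nomatch (l : List Char) (h : ∀ rest : List Char, l = '0' :: '3' :: rest → False) :
    pvCount03 l = 0 := by
  unfold pvCount03; split
  · rename_i l0 rest; exact (h rest rfl).elim
  · rfl

theorem pvCount03_take (l : List Char) : l.take (2 * pvCount03 l) = pvRep03 (pvCount03 l) := by
  induction l using pvCount03.induct with
  | case1 rest ih =>
      have h2 : 2 * (pvCount03 rest + 1) = (2 * pvCount03 rest) + 1 + 1 := by omega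
      simp [pvCount03, pvRep03, h2, List.take_succ_cons, ih]
  | case2 l h =>
      simp [pvCount03_nomatch l h, pvRep03]

theorem pvCount03_le (l : List Char) : 2 * pvCount03 l ≤ l.length := by
  induction l using pvCount03.induct with
  | case1 rest ih => simp [pvCount03]; omega
  | case2 l h => simp [pvCount03_nomatch l h]

theorem pvRep03_take (j k : Nat) (h : j ≤ k) : (pvRep03 k).take (2 * j) = pvRep03 j := by
  induction j generalizing k with
  | zero => simp [pvRep03]
  | succ j ih =>
      cases k with
      | zero => omega
      | succ k =>
          have h2 : 2 * (j + 1) = (2 * j) + 1 + 1 := by omega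
          simp [pvRep03, h2, List.take_succ_cons, ih k (by omega)]

-- a trailing suffix of length 2*j is all '30' pairs iff j ≤ the backward count
theorem pvSuffix_iff (c : List Char) (j : Nat) (hj : 2 * j ≤ c.length) :
    c.drop (c.length - 2 * j) = pvRepA j ↔ j ≤ pvCount03 c.reverse := by
  constructor
  · intro h
    have hrev : c.reverse = pvRep03 j ++ (c.take (c.length - 2 * j)).reverse := by
      rw [← pvRepA_reverse, ← List.reverse_append, ← h, List.take_append_drop]
    rw [hrev, pvCount03_rep]; omega
  · intro h
    have h1 : c.reverse.take (2 * pvCount03 c.reverse) = pvRep03 (pvCount03 c.reverse) :=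
      pvCount03_take _
    have h2 : c.reverse.take (2 * j) = (c.reverse.take (2 * pvCount03 c.reverse)).take (2 * j) := by
      rw [List.take_take]; congr 1; omega
    have h3 : c.reverse.take (2 * j) = pvRep03 j := by
      rw [h2, h1, pvRep03_take j _ h]
    have h4 : c.drop (c.length - 2 * j) = (c.reverse.take (2 * j)).reverse := by
      rw [List.take_reverse, List.reverse_reverse]
    rw [h4, h3, ← pvRepA_reverse]
    simp

-- the cut position of the result
def pvCut (c : List Char) : Nat :=
  if pvCount03 c.reverse ≠ 0 then c.length - 2 * pvCount03 c.reverse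
  else if c.length % 2 = 1 ∧ c.getD (c.length - 1) ' ' = '0' then c.length - 1
  else c.length

theorem pvCut_le (c : List Char) : pvCut c ≤ c.length := by
  unfold pvCut; split_ifs <;> omega

theorem pvLoopA_eq (c : List Char) (i : Nat) (res : List Char) (hi : i ≤ pvCut c) :
    pvLoopA c i res = res ++ (c.take (pvCut c)).drop i := by
  have hk := pvCount03_le c.reverse
  simp only [List.length_reverse] at hk
  rcases Nat.lt_or_ge i (pvCut c) with hlt | hge
  · -- i < pvCut c : no break fires, step and recurse
    have hin : i < c.length := lt_of_lt_of_le hlt (pvCut_le c)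
    rw [pvLoopA]
    have hnb1 : ¬ ((i + 2 ≤ c.length ∧ c.getD i ' ' = '3' ∧ c.getD (i+1) ' ' = '0')
        ∧ c.drop i = pvRepA ((c.length - i) / 2)) := by
      rintro ⟨⟨h2, _, _⟩, hdrop⟩
      have hlen : c.length - i = 2 * ((c.length - i) / 2) := by
        have := congrArg List.length hdrop
        rw [List.length_drop, pvRepA_length] at this
        omega
      set j := (c.length - i) / 2 with hj
      have hji : i = c.length - 2 * j := by omega
      have h2j : 2 * j ≤ c.length := by omega
      have : j ≤ pvCount03 c.reverse := by
        rw [← pvSuffix_iff c j h2j, ← hji]; exact hdrop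
      have hj1 : 1 ≤ j := by omega
      unfold pvCut at hlt
      split_ifs at hlt with hz hodd <;> omega
    rw [if_pos hin, if_neg hnb1]
    have hnb2 : ¬ (i = c.length - 1 ∧ c.length % 2 ≠ 0 ∧ c.getD i ' ' = '0') := by
      rintro ⟨hi1, hodd, h0⟩
      unfold pvCut at hlt
      split_ifs at hlt with hz hcond
      · omega
      · omega
      · exact hcond ⟨by omega, hi1 ▸ h0⟩
    rw [if_neg hnb2]
    rw [pvLoopA_eq c (i+1) _ (by omega)]
    have hgd : (c.take (pvCut c)).drop i = c.getD i ' ' :: (c.take (pvCut c)).drop (i+1) := by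
      have hilen : i < (c.take (pvCut c)).length := by
        simp [List.length_take]; exact ⟨hlt, hin⟩
      rw [List.drop_eq_getElem_cons hilen]
      congr 1
      rw [List.getElem_take]
      exact (List.getD_eq_getElem c ' ' hin).symm
    rw [hgd]; simp
  · -- i = pvCut c : the loop stops here
    have hieq : i = pvCut c := le_antisymm hi hge
    subst hieq
    rw [List.drop_take]
    simp only [Nat.sub_self, List.take_zero, List.append_nil]
    by_cases hz : pvCount03 c.reverse ≠ 0
    · -- k ≥ 1 : first break condition fires
      have hcut : pvCut c = c.length - 2 * pvCount03 c.reverse := by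
        unfold pvCut; rw [if_pos hz]
      have hk1 : 1 ≤ pvCount03 c.reverse := Nat.one_le_iff_ne_zero.mpr hz
      have hdrop : c.drop (c.length - 2 * pvCount03 c.reverse) = pvRepA (pvCount03 c.reverse) :=
        (pvSuffix_iff c _ hk).mpr (le_refl _)
      have hA : pvRepA (pvCount03 c.reverse) = '3' :: '0' :: pvRepA (pvCount03 c.reverse - 1) := by
        rcases Nat.exists_eq_add_of_le hk1 with ⟨m, hm⟩
        rw [hm]; simp [pvRepA, Nat.add_comm]
      rw [hcut, pvLoopA, if_pos (by omega), if_pos]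
      refine ⟨⟨by omega, ?_, ?_⟩, ?_⟩
      · have h1 : c.getD (c.length - 2 * pvCount03 c.reverse) ' '
            = (c.drop (c.length - 2 * pvCount03 c.reverse)).getD 0 ' ' := by
          simp [List.getD_eq_getElem?_getD, List.getElem?_drop]
        rw [h1, hdrop, hA]; rfl
      · have h1 : c.getD (c.length - 2 * pvCount03 c.reverse + 1) ' '
            = (c.drop (c.length - 2 * pvCount03 c.reverse)).getD 1 ' ' := by
          simp [List.getD_eq_getElem?_getD, List.getElem?_drop]
        rw [h1, hdrop, hA]; rfl
      · have h2 : (c.length - (c.length - 2 * pvCount03 c.reverse)) / 2 = pvCount03 c.reverse := by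
          omega
        rw [h2]; exact hdrop
    · by_cases hodd : c.length % 2 = 1 ∧ c.getD (c.length - 1) ' ' = '0'
      · -- odd length, last char '0' : second break condition fires
        have hcut : pvCut c = c.length - 1 := by
          unfold pvCut; rw [if_neg hz, if_pos hodd]
        have hn1 : 1 ≤ c.length := by omega
        have hne : ¬ ((c.length - 1 + 2 ≤ c.length ∧ c.getD (c.length - 1) ' ' = '3'
              ∧ c.getD (c.length - 1 + 1) ' ' = '0')
            ∧ c.drop (c.length - 1) = pvRepA ((c.length - (c.length - 1)) / 2)) := by
          rintro ⟨⟨h2, _, _⟩, _⟩; omega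
        rw [hcut, pvLoopA, if_pos (by omega), if_neg hne,
          if_pos ⟨rfl, by omega, hodd.2⟩]
      · have hcut : pvCut c = c.length := by
          unfold pvCut; rw [if_neg hz, if_neg hodd]
        rw [hcut, pvLoopA, if_neg (lt_irrefl _)]
termination_by pvCut c - i

theorem pvMain (c : List Char) :
    String.mk (pvLoopA c 0 []) =
      (if pvCount03 c.reverse ≠ 0 then String.mk (c.take (c.length - 2 * pvCount03 c.reverse))
       else if c.length % 2 = 1 ∧ c.getD (c.length - 1) ' ' = '0' then String.mk c.dropLast
       else String.mk c) := by
  rw [pvLoopA_eq c 0 [] (Nat.zero_le _)]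
  simp only [List.drop_zero, List.nil_append]
  unfold pvCut
  split_ifs with hz hodd
  · rfl
  · rw [List.dropLast_eq_take]
  · rw [List.take_length]

-- ===== VERDICT (by name: the statement is the Claim_ definition above) =====
theorem preparetextdecipher_spec : Claim_equal_preparetextdecipher := by
  intro vec_num _
  unfold Spec_preparetextdecipher preparetextdecipher preparetextdecipher_alt
  exact pvMain _
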